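-- pv_equiv track=rewrite | github.com/lawrencecraft/AdventOfCode2019 | day12.py | calculatePlanetGravities
-- ===== SOURCE A (Python) =====
-- def calculateGravity(p1, p2):
--     def calc(x):
--         i,j = x
--         if i == j:
--             return 0
--         elif i > j:
--             return -1
--         else:
--             return 1
--     return tuple(map(calc, zip(p1, p2)))
--
-- def calculatePlanetGravities(planets):
--     velocityChanges = [tuple(0 for _ in i) for i in planets]
--     for i1, p1 in enumerate(planets):
--         for basei2, p2 in enumerate(planets[i1+1:]):
--             i2 = basei2 + i1 + 1
--             gravity = calculateGravity(p1, p2)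
--             def app(i, v):
--                 velocityChanges[i] = tuple(map(sum, zip(velocityChanges[i], v)))
--             app(i1, gravity)
--             app(i2, map(lambda x: -x, gravity))
--
--     return velocityChanges
-- ===== SOURCE B (Python) =====
-- def calculatePlanetGravities(planets):
--     n = len(planets)
--     if n == 0:
--         return []
--     m = len(planets[0])
--     lts = []
--     les = []
--     for d in range(m):
--         col = sorted(p[d] for p in planets)
--         lt = {}
--         le = {}
--         for i, v in enumerate(col):
--             lt.setdefault(v, i)
--             le[v] = i + 1
--         lts.append(lt)
--         les.append(le)
--     return [tuple((n - les[d][p[d]]) - lts[d][p[d]] for d in range(m)) for p in planets]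
-- ===== Notes on version B (the rewrite author's own statement) =====
-- stated objective: faster
-- what changed: Replaces the O(d·n^2) pairwise gravity accumulation by a per-dimension sort with a one-pass rank table (first/last index of each value in the sorted column), so each planet's change per dimension is (#greater - #less) read off two dict lookups.
-- outside the precondition, e.g. on calculatePlanetGravities([(1, 2), (3,)]): A returns [(1,), (-1,)], B raises IndexError
import Mathlib
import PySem

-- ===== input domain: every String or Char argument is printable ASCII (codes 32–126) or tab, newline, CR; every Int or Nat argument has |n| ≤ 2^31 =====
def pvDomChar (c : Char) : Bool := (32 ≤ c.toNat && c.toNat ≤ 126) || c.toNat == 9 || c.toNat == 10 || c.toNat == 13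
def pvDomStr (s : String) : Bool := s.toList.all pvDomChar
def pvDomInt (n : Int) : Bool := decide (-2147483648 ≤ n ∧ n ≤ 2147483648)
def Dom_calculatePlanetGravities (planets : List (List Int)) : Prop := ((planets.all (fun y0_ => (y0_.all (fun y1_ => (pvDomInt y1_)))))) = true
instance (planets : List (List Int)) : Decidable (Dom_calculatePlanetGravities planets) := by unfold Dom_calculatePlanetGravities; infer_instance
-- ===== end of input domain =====

-- B replaces A's O(d·n²) pairwise accumulation by a per-dimension sort with a one-pass
-- first/last-index rank table, reading each planet's change as (#greater − #less): faster (asymptotic).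

-- ===== PORT A =====
def pvCalc (x : Int × Int) : Int := if x.1 = x.2 then 0 else if x.1 > x.2 then -1 else 1

def calculateGravity (p1 p2 : List Int) : List Int := (p1.zip p2).map pvCalc

-- velocityChanges[i] = tuple(map(sum, zip(velocityChanges[i], v)))
def pvApp (a v : List Int) : List Int := (a.zip v).map (fun x => x.1 + x.2)

def calculatePlanetGravities (planets : List (List Int)) : List (List Int) :=
  let init := planets.map (fun i => i.map (fun _ => (0 : Int)))
  (PySem.List.enumerate planets).foldl (fun vc e1 =>
    (PySem.List.enumerate (PySem.List.slice planets (some (e1.1 + 1)) none)).foldl (fun vc e2 =>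
      let i2 : Int := e2.1 + e1.1 + 1
      let g := calculateGravity e1.2 e2.2
      -- list indices produced by enumerate are ≥ 0, so .toNat is exact here
      let vc' := vc.modify e1.1.toNat (fun a => pvApp a g)
      vc'.modify i2.toNat (fun a => pvApp a (g.map (fun x => -x)))) vc) init

-- ===== PORT B =====
-- one pass over the sorted column: lt = first index of each value (setdefault),
-- le = last index + 1 (plain insert overwrites)
def pvRanks (col : List Int) : PySem.Dict Int Int × PySem.Dict Int Int :=
  (PySem.List.enumerate col).foldl
    (fun st iv => (st.1.setdefault iv.2 iv.1, st.2.insert iv.2 (iv.1 + 1)))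
    (PySem.Dict.empty, PySem.Dict.empty)

def calculatePlanetGravities_alt (planets : List (List Int)) : List (List Int) :=
  let n : Int := PySem.List.len planets
  if planets.isEmpty then [] else
  let m : Int := PySem.List.len (planets.headD [])
  let ranks := (PySem.List.pyRange 0 m).map (fun d =>
    pvRanks (PySem.List.sorted (planets.map (fun p => PySem.List.pyGetD p d 0)) (fun x => x)))
  planets.map (fun p => (PySem.List.pyRange 0 m).map (fun d =>
    let r := ranks.getD d.toNat (PySem.Dict.empty, PySem.Dict.empty)
    let x := PySem.List.pyGetD p d 0
    (n - r.2.getD x 0) - r.1.getD x 0))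

-- ===== PRECONDITION & SPEC =====
-- Pre_ excludes inputs in which some planet row is strictly shorter than the first row:
-- there B raises IndexError while A silently returns rows truncated by zip to the shortest planet.
def Pre_calculatePlanetGravities (planets : List (List Int)) : Prop :=
  ∀ p ∈ planets, (planets.headD []).length ≤ p.length
instance (planets : List (List Int)) : Decidable (Pre_calculatePlanetGravities planets) := by
  unfold Pre_calculatePlanetGravities; infer_instance

def pvWitness_calculatePlanetGravities : List (List Int) := [[1, 2], [3, -4], [0, 7]]

def Spec_calculatePlanetGravities (planets : List (List Int)) (out : List (List Int)) : Prop := out = calculatePlanetGravities_alt planets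
instance (planets : List (List Int)) (out : List (List Int)) : Decidable (Spec_calculatePlanetGravities planets out) := by unfold Spec_calculatePlanetGravities; infer_instance

-- ===== CLAIM (what is proved, stated in full; the proofs are below) =====
def Claim_equal_calculatePlanetGravities : Prop := ∀ (planets : List (List Int)), Dom_calculatePlanetGravities planets → Pre_calculatePlanetGravities planets → Spec_calculatePlanetGravities planets (calculatePlanetGravities planets)

-- ===== LEMMAS AND PROOFS =====

def pvUpds (planets : List (List Int)) : List (Nat × List Int) :=
  (List.range planets.length).flatMap (fun i =>
    (List.range (planets.length - (i + 1))).flatMap (fun b =>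
      [(i, calculateGravity (planets.getD i []) (planets.getD (i + 1 + b) [])),
       (i + 1 + b, (calculateGravity (planets.getD i []) (planets.getD (i + 1 + b) [])).map (fun x => -x))]))

def pvApplyUpds (vc : List (List Int)) (us : List (Nat × List Int)) : List (List Int) :=
  us.foldl (fun vc u => vc.modify u.1 (fun a => pvApp a u.2)) vc

theorem pvApp_length (a v : List Int) : (pvApp a v).length = min a.length v.length := by
  simp [pvApp]

theorem pvApp_getD (a v : List Int) (d : Nat) (h1 : d < a.length) (h2 : d < v.length) :
    (pvApp a v).getD d 0 = a.getD d 0 + v.getD d 0 := by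
  simp [pvApp, List.getD_eq_getElem?_getD, h1, h2, List.getElem_zip]

theorem calcG_length (p q : List Int) : (calculateGravity p q).length = min p.length q.length := by
  simp [calculateGravity]

theorem calcG_getD (p q : List Int) (d : Nat) (h1 : d < p.length) (h2 : d < q.length) :
    (calculateGravity p q).getD d 0 = pvCalc (p.getD d 0, q.getD d 0) := by
  simp [calculateGravity, List.getD_eq_getElem?_getD, h1, h2, List.getElem_zip]

theorem negmap_getD (l : List Int) (d : Nat) (h : d < l.length) :
    (l.map (fun x => -x)).getD d 0 = -(l.getD d 0) := by
  simp [List.getD_eq_getElem?_getD, h]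

theorem pvCalc_antisym (a b : Int) : pvCalc (b, a) = - pvCalc (a, b) := by
  unfold pvCalc; dsimp only; split_ifs <;> omega

theorem pvApplyUpds_length (us : List (Nat × List Int)) (vc : List (List Int)) :
    (pvApplyUpds vc us).length = vc.length := by
  induction us generalizing vc with
  | nil => rfl
  | cons u us ih => simp [pvApplyUpds, List.foldl_cons] at ih ⊢; rw [ih, List.length_modify]

theorem pvApplyUpds_getD (us : List (Nat × List Int)) (vc : List (List Int)) (k : Nat)
    (h : k < vc.length) :
    (pvApplyUpds vc us).getD k [] =
      ((us.filter (fun u => u.1 == k)).map (·.2)).foldl pvApp (vc.getD k []) := by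
  induction us generalizing vc with
  | nil => rfl
  | cons u us ih =>
    have hm : k < (vc.modify u.1 (fun a => pvApp a u.2)).length := by
      rw [List.length_modify]; exact h
    have step : pvApplyUpds vc (u :: us) = pvApplyUpds (vc.modify u.1 (fun a => pvApp a u.2)) us := rfl
    rw [step, ih _ hm]
    have hget : (vc.modify u.1 (fun a => pvApp a u.2)).getD k [] =
        if u.1 = k then pvApp (vc.getD k []) u.2 else vc.getD k [] := by
      rw [List.getD_eq_getElem _ _ hm, List.getD_eq_getElem _ _ h, List.getElem_modify]
    by_cases hk : u.1 = k
    · rw [List.filter_cons_of_pos (by simp [hk])]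
      simp only [List.map_cons, List.foldl_cons]
      rw [hget, if_pos hk]
    · rw [List.filter_cons_of_neg (by simp [hk])]
      rw [hget, if_neg hk]

def pvMinLen (vs : List (List Int)) (t : Nat) : Nat := vs.foldl (fun t v => min t v.length) t

theorem pvMinLen_cons (v : List Int) (vs : List (List Int)) (t : Nat) :
    pvMinLen (v :: vs) t = pvMinLen vs (min t v.length) := rfl

theorem pvMinLen_le_init (vs : List (List Int)) (t : Nat) : pvMinLen vs t ≤ t := by
  induction vs generalizing t with
  | nil => exact le_refl t
  | cons v vs ih =>
    rw [pvMinLen_cons]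
    exact le_trans (ih _) (min_le_left _ _)

theorem pvMinLen_le_mem (vs : List (List Int)) (t : Nat) {v : List Int} (h : v ∈ vs) :
    pvMinLen vs t ≤ v.length := by
  induction vs generalizing t with
  | nil => cases h
  | cons w vs ih =>
    rw [pvMinLen_cons]
    rcases List.mem_cons.mp h with rfl | h
    · exact le_trans (pvMinLen_le_init _ _) (min_le_right _ _)
    · exact ih _ h

theorem le_pvMinLen (vs : List (List Int)) (t c : Nat) (h1 : c ≤ t)
    (h2 : ∀ v ∈ vs, c ≤ v.length) : c ≤ pvMinLen vs t := by
  induction vs generalizing t with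
  | nil => exact h1
  | cons v vs ih =>
    rw [pvMinLen_cons]
    exact ih _ (le_min h1 (h2 v List.mem_cons_self)) (fun w hw => h2 w (List.mem_cons_of_mem _ hw))

theorem pvChain_length (vs : List (List Int)) (a : List Int) :
    (vs.foldl pvApp a).length = pvMinLen vs a.length := by
  induction vs generalizing a with
  | nil => rfl
  | cons v vs ih =>
    rw [List.foldl_cons, ih, pvMinLen_cons, pvApp_length]

theorem pvChain_getD (vs : List (List Int)) (a : List Int) (d : Nat)
    (hd : d < pvMinLen vs a.length) :
    (vs.foldl pvApp a).getD d 0 = a.getD d 0 + (vs.map (fun v => v.getD d 0)).sum := by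
  induction vs generalizing a with
  | nil => simp
  | cons v vs ih =>
    rw [pvMinLen_cons] at hd
    have h2 : d < min a.length v.length := lt_of_lt_of_le hd (pvMinLen_le_init _ _)
    have hd' : d < pvMinLen vs (pvApp a v).length := by rw [pvApp_length]; exact hd
    rw [List.foldl_cons, ih _ hd', pvApp_getD a v d (by omega) (by omega)]
    simp [add_assoc]

theorem pvSumCalc (col : List Int) (v : Int) :
    (col.map (fun c => pvCalc (v, c))).sum =
      (col.countP (fun c => decide (v < c)) : Int) - (col.countP (fun c => decide (c < v)) : Int) := by
  induction col with
  | nil => simp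
  | cons c col ih =>
    simp only [List.map_cons, List.sum_cons, List.countP_cons, ih]
    unfold pvCalc
    dsimp only
    split_ifs <;> simp_all <;> omega

theorem pvCountLe (col : List Int) (v : Int) :
    (col.countP (fun c => decide (v < c)) : Int) = col.length - col.countP (fun c => decide (c ≤ v)) := by
  have h1 := List.length_eq_countP_add_countP (l := col) (p := fun c => decide (c ≤ v))
  have h2 : col.countP (fun a => decide (¬ decide (a ≤ v) = true)) = col.countP (fun c => decide (v < c)) := by
    apply List.countP_congr
    intro c _
    simp
  omega

def pvRankGo (xs : List (Int × Int)) (st : PySem.Dict Int Int × PySem.Dict Int Int) :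
    PySem.Dict Int Int × PySem.Dict Int Int :=
  xs.foldl (fun st iv => (st.1.setdefault iv.2 iv.1, st.2.insert iv.2 (iv.1 + 1))) st

theorem pvRanks_eq_go (col : List Int) :
    pvRanks col = pvRankGo (PySem.List.enumerate col) (PySem.Dict.empty, PySem.Dict.empty) := rfl

theorem pvRankGo_spec (col : List Int) (s : Int) (lt le : PySem.Dict Int Int)
    (hs : col.Pairwise (· ≤ ·)) :
    (∀ v, v ∉ col →
      ((pvRankGo (PySem.List.enumerate col s) (lt, le)).1.get? v = lt.get? v ∧
       (pvRankGo (PySem.List.enumerate col s) (lt, le)).2.get? v = le.get? v)) ∧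
    (∀ v ∈ col,
      (pvRankGo (PySem.List.enumerate col s) (lt, le)).1.get? v
          = some ((lt.get? v).getD (s + (col.countP (fun c => decide (c < v)) : Int))) ∧
      (pvRankGo (PySem.List.enumerate col s) (lt, le)).2.get? v
          = some (s + (col.countP (fun c => decide (c ≤ v)) : Int))) := by
  induction col generalizing s lt le with
  | nil => exact ⟨fun v _ => ⟨rfl, rfl⟩, fun v hv => absurd hv (List.not_mem_nil)⟩
  | cons c rest ih =>
    have hrest : rest.Pairwise (· ≤ ·) := hs.of_cons
    have hle : ∀ y ∈ rest, c ≤ y := fun y hy => List.rel_of_pairwise_cons hs hy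
    have hstep : pvRankGo (PySem.List.enumerate (c :: rest) s) (lt, le)
        = pvRankGo (PySem.List.enumerate rest (s + 1)) (lt.setdefault c s, le.insert c (s + 1)) := by
      rw [PySem.List.enumerate_cons]; rfl
    obtain ⟨ihout, ihin⟩ := ih (s + 1) (lt.setdefault c s) (le.insert c (s + 1)) hrest
    constructor
    · intro v hv
      have hvc : v ≠ c := fun h => hv (h ▸ List.mem_cons_self)
      have hvr : v ∉ rest := fun h => hv (List.mem_cons_of_mem _ h)
      obtain ⟨h1, h2⟩ := ihout v hvr
      rw [hstep]
      exact ⟨by rw [h1, PySem.Dict.get?_setdefault_of_ne _ _ hvc],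
             by rw [h2, PySem.Dict.get?_insert_of_ne _ _ hvc]⟩
    · intro v hv
      rw [hstep]
      by_cases hvr : v ∈ rest
      · obtain ⟨h1, h2⟩ := ihin v hvr
        by_cases hvc : v = c
        · subst hvc
          have hcnt : rest.countP (fun x => decide (x < v)) = 0 := by
            rw [List.countP_eq_zero]
            intro y hy
            simpa using not_lt_of_ge (hle y hy)
          constructor
          · rw [h1, PySem.Dict.get?_setdefault_self]
            simp only [List.countP_cons, decide_eq_true_eq, lt_irrefl, if_false, hcnt]
            simp
          · rw [h2]
            congr 1
            simp
            ring
        · have hcv : c < v := lt_of_le_of_ne (hle v hvr) (fun h => hvc h.symm)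
          constructor
          · rw [h1, PySem.Dict.get?_setdefault_of_ne _ _ hvc]
            have : (c :: rest).countP (fun x => decide (x < v))
                = rest.countP (fun x => decide (x < v)) + 1 := by
              simp [hcv]
            rw [this]
            push_cast
            ring_nf
          · rw [h2]
            have : (c :: rest).countP (fun x => decide (x ≤ v))
                = rest.countP (fun x => decide (x ≤ v)) + 1 := by
              simp [le_of_lt hcv]
            rw [this]
            push_cast
            ring_nf
      · have hvc : v = c := by
          rcases List.mem_cons.mp hv with h | h
          · exact h
          · exact absurd h hvr
        subst hvc
        obtain ⟨h1, h2⟩ := ihout v hvr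
        have hgt : ∀ y ∈ rest, v < y := by
          intro y hy
          exact lt_of_le_of_ne (hle y hy) (fun h => hvr (h ▸ hy))
        have hcnt : rest.countP (fun x => decide (x < v)) = 0 := by
          rw [List.countP_eq_zero]
          intro y hy
          simpa using not_lt_of_ge (le_of_lt (hgt y hy))
        have hcnt2 : rest.countP (fun x => decide (x ≤ v)) = 0 := by
          rw [List.countP_eq_zero]
          intro y hy
          simpa using not_le_of_gt (hgt y hy)
        constructor
        · rw [h1, PySem.Dict.get?_setdefault_self]
          simp only [List.countP_cons, decide_eq_true_eq, lt_irrefl, if_false, hcnt]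
          simp
        · rw [h2, PySem.Dict.get?_insert_self]
          simp only [List.countP_cons, hcnt2]
          have : decide (v ≤ v) = true := by simp
          rw [this]
          norm_num

theorem pvEnum_eq {α : Type} (xs : List α) (d : α) :
    PySem.List.enumerate xs = (List.range xs.length).map (fun (k : Nat) => ((k : Int), xs.getD k d)) := by
  rw [PySem.List.enumerate_eq_map_pyRange xs d, PySem.List.pyRange_one, List.map_map]
  simp only [PySem.List.len_eq, Int.sub_zero, Int.toNat_natCast]
  apply List.map_congr_left
  intro k hk
  simp [PySem.List.pyGetD_natCast, List.getD_eq_getElem?_getD]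

theorem pvDropGetD {α : Type} (xs : List α) (j b : Nat) (d : α) :
    (xs.drop j).getD b d = xs.getD (j + b) d := by
  simp [List.getD_eq_getElem?_getD, List.getElem?_drop]

theorem pvApplyUpds_flatMap {β : Type} (l : List β) (f : β → List (Nat × List Int))
    (vc : List (List Int)) :
    pvApplyUpds vc (l.flatMap f) = l.foldl (fun vc x => pvApplyUpds vc (f x)) vc := by
  rw [pvApplyUpds, List.flatMap, List.foldl_flatten, List.foldl_map]
  rfl

theorem A_eq_applyUpds (planets : List (List Int)) :
    calculatePlanetGravities planets =
      pvApplyUpds (planets.map (fun i => i.map (fun _ => (0 : Int)))) (pvUpds planets) := by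
  rw [pvUpds, pvApplyUpds_flatMap]
  show (PySem.List.enumerate planets).foldl _ _ = _
  rw [pvEnum_eq planets [], List.foldl_map]
  apply PySem.List.foldl_congr_mem
  intro vc i hi
  have hi' : i < planets.length := List.mem_range.mp hi
  rw [pvApplyUpds_flatMap]
  show (PySem.List.enumerate (PySem.List.slice planets (some ((i : Int) + 1)) none)).foldl _ _ = _
  have hc : ((i : Int) + 1) = ((i + 1 : Nat) : Int) := by push_cast; ring
  rw [hc, PySem.List.slice_from_natCast, pvEnum_eq (planets.drop (i + 1)) [], List.foldl_map,
    List.length_drop]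
  apply PySem.List.foldl_congr_mem
  intro vc' b hb
  have ht : ((b : Int) + (i : Int) + 1).toNat = i + 1 + b := by omega
  have ht' : ((i : Int)).toNat = i := Int.toNat_natCast i
  have hg : (planets.drop (i + 1)).getD b [] = planets.getD (i + 1 + b) [] := pvDropGetD _ _ _ _
  dsimp only
  rw [ht, ht', hg]
  rfl

theorem pvFlatMap_singletons {α : Type} (l : List Nat) (F : Nat → List α) (g : Nat → α)
    (h : ∀ i ∈ l, F i = [g i]) : l.flatMap F = l.map g := by
  induction l with
  | nil => rfl
  | cons a l ih =>
    rw [List.flatMap_cons, List.map_cons, h a List.mem_cons_self,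
      ih (fun i hi => h i (List.mem_cons_of_mem _ hi))]
    rfl

theorem pvFlatMap_nils {α : Type} (l : List Nat) (F : Nat → List α)
    (h : ∀ i ∈ l, F i = []) : l.flatMap F = [] := by
  rw [List.flatMap_eq_nil_iff]
  intro i hi
  exact h i hi

theorem pvFlatMap_range_single {α : Type} (M b0 : Nat) (s : Nat → List α) (h : b0 < M) :
    (List.range M).flatMap (fun b => if b = b0 then s b else []) = s b0 := by
  induction M with
  | zero => omega
  | succ M ih =>
    rw [List.range_succ, List.flatMap_append]
    by_cases hb : b0 < M
    · rw [ih hb, List.flatMap_cons]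
      simp [Nat.ne_of_gt hb]
    · have : b0 = M := by omega
      subst this
      rw [pvFlatMap_nils _ _ (fun i hi => by simp [Nat.ne_of_lt (List.mem_range.mp hi)])]
      simp

theorem pvUpds_filter (planets : List (List Int)) (k : Nat) (hk : k < planets.length) :
    (pvUpds planets).filter (fun u => u.1 == k) =
      (List.range k).map (fun i =>
        (k, (calculateGravity (planets.getD i []) (planets.getD k [])).map (fun x => -x)))
      ++ (List.range (planets.length - (k + 1))).map (fun b =>
        (k, calculateGravity (planets.getD k []) (planets.getD (k + 1 + b) []))) := by
  rw [pvUpds, List.filter_flatMap]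
  have hsplit : List.range planets.length
      = List.range k ++ ([k] ++ (List.range (planets.length - (k + 1))).map (fun j => (k + 1) + j)) := by
    rw [← List.append_assoc, ← List.range_succ, ← List.range_add]
    congr 1
    omega
  have hnil : ((List.range k).map (fun i =>
        (k, (calculateGravity (planets.getD i []) (planets.getD k [])).map (fun x => -x)))
      ++ (List.range (planets.length - (k + 1))).map (fun b =>
        (k, calculateGravity (planets.getD k []) (planets.getD (k + 1 + b) []))))
      = (List.range k).map (fun i =>
        (k, (calculateGravity (planets.getD i []) (planets.getD k [])).map (fun x => -x)))
      ++ ((List.range (planets.length - (k + 1))).map (fun b =>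
        (k, calculateGravity (planets.getD k []) (planets.getD (k + 1 + b) []))) ++ []) := by simp
  rw [hsplit, List.flatMap_append, List.flatMap_append, hnil]
  congr 1
  · -- i < k part: each contributes the single negated update aimed at k
    apply pvFlatMap_singletons
    intro i hi
    have hik : i < k := List.mem_range.mp hi
    rw [List.filter_flatMap]
    have hfe : (fun b => ([(i, calculateGravity (planets.getD i []) (planets.getD (i + 1 + b) [])),
            (i + 1 + b, (calculateGravity (planets.getD i []) (planets.getD (i + 1 + b) [])).map (fun x => -x))].filter
              (fun u => u.1 == k)))
        = (fun b => if b = k - (i + 1) then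
            [(i + 1 + b, (calculateGravity (planets.getD i []) (planets.getD (i + 1 + b) [])).map (fun x => -x))] else []) := by
      funext b
      by_cases hbk : i + 1 + b = k
      · rw [if_pos (by omega)]
        simp [Nat.ne_of_lt hik, hbk]
      · rw [if_neg (by omega)]
        simp [Nat.ne_of_lt hik, hbk]
    rw [hfe, pvFlatMap_range_single _ (k - (i + 1)) _ (by omega)]
    have h2 : i + 1 + (k - (i + 1)) = k := by omega
    rw [h2]
  · congr 1
    · -- i = k part
      rw [List.flatMap_cons, List.flatMap_nil, List.append_nil, List.filter_flatMap]
      apply pvFlatMap_singletons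
      intro b hb
      simp only [List.filter_cons]
      norm_num
      omega
    · -- i > k part: nothing aimed at k
      apply pvFlatMap_nils
      intro j hj
      obtain ⟨j0, hj0, rfl⟩ := List.mem_map.mp hj
      rw [List.filter_flatMap]
      apply pvFlatMap_nils
      intro b hb
      simp [Nat.ne_of_gt (by omega : k < k + 1 + j0),
        Nat.ne_of_gt (by omega : k < k + 1 + j0 + 1 + b)]

theorem pvRange0 (m : Nat) : PySem.List.pyRange 0 (m : Int) = (List.range m).map (fun (k : Nat) => (k : Int)) := by
  rw [PySem.List.pyRange_one]
  simp only [Int.sub_zero, Int.toNat_natCast, zero_add]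

theorem pvCalc_refl (a : Int) : pvCalc (a, a) = 0 := by
  simp [pvCalc]

theorem pvGetD_map {α β : Type} (l : List α) (f : α → β) (k : Nat) (d1 : α) (d2 : β)
    (h : k < l.length) : (l.map f).getD k d2 = f (l.getD k d1) := by
  rw [List.getD_eq_getElem _ _ (by simpa using h), List.getD_eq_getElem _ _ h, List.getElem_map]

-- the rank tables built from the sorted column read back as counts over the column
theorem pvRanks_getD (col : List Int) (v : Int) (hv : v ∈ col) :
    (pvRanks (PySem.List.sorted col (fun x => x))).1.getD v 0
        = (col.countP (fun c => decide (c < v)) : Int) ∧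
    (pvRanks (PySem.List.sorted col (fun x => x))).2.getD v 0
        = (col.countP (fun c => decide (c ≤ v)) : Int) := by
  have hperm := PySem.List.sorted_perm col (fun x => x) false
  have hpair : (PySem.List.sorted col (fun x => x)).Pairwise (· ≤ ·) := by
    have := PySem.List.sorted_pairwise col (fun x => x)
    simpa using this
  have hvs : v ∈ PySem.List.sorted col (fun x => x) :=
    (PySem.List.mem_sorted col (fun x => x) false v).mpr hv
  obtain ⟨_, hin⟩ := pvRankGo_spec (PySem.List.sorted col (fun x => x)) 0
    PySem.Dict.empty PySem.Dict.empty hpair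
  obtain ⟨h1, h2⟩ := hin v hvs
  rw [pvRanks_eq_go]
  have hc1 : (PySem.List.sorted col (fun x => x)).countP (fun c => decide (c < v))
      = col.countP (fun c => decide (c < v)) := hperm.countP_eq _
  have hc2 : (PySem.List.sorted col (fun x => x)).countP (fun c => decide (c ≤ v))
      = col.countP (fun c => decide (c ≤ v)) := hperm.countP_eq _
  constructor
  · rw [PySem.Dict.getD_of_get?_eq_some _ _ h1]
    simp [PySem.Dict.get?_empty, hc1]
  · rw [PySem.Dict.getD_of_get?_eq_some _ _ h2]
    simp [hc2]

def pvVal (planets : List (List Int)) (p : List Int) (d : Nat) : Int :=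
  ((planets.length : Int)
      - ((planets.map (fun q => q.getD d 0)).countP (fun c => decide (c ≤ p.getD d 0)) : Int))
    - ((planets.map (fun q => q.getD d 0)).countP (fun c => decide (c < p.getD d 0)) : Int)

theorem B_eq_count (planets : List (List Int)) (hne : planets ≠ []) :
    calculatePlanetGravities_alt planets
      = planets.map (fun p =>
          (List.range ((planets.headD []).length)).map (fun d => pvVal planets p d)) := by
  have hie : planets.isEmpty = false := by simpa [List.isEmpty_iff] using hne
  unfold calculatePlanetGravities_alt
  simp only [hie, Bool.false_eq_true, if_false, PySem.List.len_eq, pvRange0, List.map_map]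
  apply List.map_congr_left
  intro p hp
  apply List.map_congr_left
  intro k hk
  have hkm : k < (planets.headD []).length := List.mem_range.mp hk
  dsimp only [Function.comp]
  rw [PySem.List.pyGetD_natCast, Int.toNat_natCast,
    PySem.List.getD_map_range _ _ _ _ hkm]
  simp only [Function.comp_apply]
  have hcol : planets.map (fun q => PySem.List.pyGetD q (k : Int) 0)
      = planets.map (fun q => q.getD k 0) :=
    List.map_congr_left (fun q _ => PySem.List.pyGetD_natCast q k 0)
  rw [hcol]
  have hmem : p.getD k 0 ∈ planets.map (fun q => q.getD k 0) :=
    List.mem_map.mpr ⟨p, hp, rfl⟩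
  obtain ⟨h1, h2⟩ := pvRanks_getD (planets.map (fun q => q.getD k 0)) (p.getD k 0) hmem
  rw [h1, h2, pvVal]

theorem pvMapRange {α β : Type} (l : List α) (h : α → β) (dflt : α) :
    (List.range l.length).map (fun j => h (l.getD j dflt)) = l.map h := by
  apply List.ext_getElem
  · simp
  · intro j h1 h2
    rw [List.getElem_map, List.getElem_map, List.getElem_range,
      List.getD_eq_getElem l dflt (by simpa using h1)]

theorem pvSumSplit (n k : Nat) (hk : k < n) (f : Nat → Int) (hfk : f k = 0) :
    ((List.range k).map f).sum
      + ((List.range (n - (k + 1))).map (fun b => f (k + 1 + b))).sum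
      = ((List.range n).map f).sum := by
  have hsplit : List.range n
      = List.range k ++ ([k] ++ (List.range (n - (k + 1))).map (fun j => (k + 1) + j)) := by
    rw [← List.append_assoc, ← List.range_succ, ← List.range_add]
    congr 1
    omega
  rw [hsplit, List.map_append, List.map_append, List.sum_append, List.sum_append, List.map_map]
  simp only [List.map_cons, List.map_nil, List.sum_cons, List.sum_nil, hfk,
    Function.comp_def]
  ring

theorem A_eq_count (planets : List (List Int))
    (hpre : ∀ p ∈ planets, (planets.headD []).length ≤ p.length) :
    calculatePlanetGravities planets
      = planets.map (fun p =>
          (List.range ((planets.headD []).length)).map (fun d => pvVal planets p d)) := by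
  rcases planets with _ | ⟨p0, rest⟩
  · rfl
  set planets := p0 :: rest with hplanets
  set n := planets.length with hn
  set m := (planets.headD []).length with hm
  have hm0 : (planets.getD 0 []).length = m := rfl
  have hpl : ∀ i, i < n → m ≤ (planets.getD i []).length := by
    intro i hi
    rw [List.getD_eq_getElem _ _ hi]
    exact hpre _ (List.getElem_mem hi)
  have hinitlen : (planets.map (fun i => i.map (fun _ => (0 : Int)))).length = n := by
    simp [hn]
  apply List.ext_getElem
  · rw [A_eq_applyUpds, pvApplyUpds_length, hinitlen]
    simp [hn]
  intro k hk1 hk2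
  have hkn : k < n := by
    rw [A_eq_applyUpds, pvApplyUpds_length, hinitlen] at hk1
    exact hk1
  -- the k-th row of A as a chain of vector additions
  rw [← List.getD_eq_getElem _ ([] : List Int) hk1, A_eq_applyUpds,
    pvApplyUpds_getD _ _ k (by rw [hinitlen]; exact hkn), pvUpds_filter planets k hkn,
    List.map_append, List.map_map, List.map_map,
    pvGetD_map planets _ k [] [] hkn]
  rw [← List.getD_eq_getElem _ ([] : List Int) hk2,
    pvGetD_map planets _ k [] [] (by simpa [hn] using hkn)]
  simp only [Function.comp_def]
  set gk := planets.getD k [] with hgk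
  have hlk : m ≤ gk.length := hpl k hkn
  set vsL := (List.range k).map (fun i =>
    (calculateGravity (planets.getD i []) gk).map (fun x => -x)) with hvsL
  set vsR := (List.range (n - (k + 1))).map (fun b =>
    calculateGravity gk (planets.getD (k + 1 + b) [])) with hvsR
  have hlenmem : ∀ v ∈ vsL ++ vsR, m ≤ v.length := by
    intro v hv
    rcases List.mem_append.mp hv with hv | hv
    · obtain ⟨i, hi, rfl⟩ := List.mem_map.mp hv
      have hik : i < k := List.mem_range.mp hi
      rw [List.length_map, calcG_length]
      exact le_min (hpl i (by omega)) hlk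
    · obtain ⟨b, hb, rfl⟩ := List.mem_map.mp hv
      have hbn : b < n - (k + 1) := List.mem_range.mp hb
      rw [calcG_length]
      exact le_min hlk (hpl (k + 1 + b) (by omega))
  have hminge : m ≤ pvMinLen (vsL ++ vsR) gk.length := le_pvMinLen _ _ _ hlk hlenmem
  have hminle : pvMinLen (vsL ++ vsR) gk.length ≤ m := by
    by_cases hk0 : k = 0
    · subst hk0
      by_cases hn1 : n = 1
      · have : vsL ++ vsR = [] := by
          rw [hvsL, hvsR, hn1]
          rfl
        rw [this]
        show gk.length ≤ m
        exact le_of_eq hm0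
      · have hn2 : 2 ≤ n := by
          have : 1 ≤ n := by simp [hn, hplanets]
          omega
        have hmem : calculateGravity gk (planets.getD (0 + 1 + 0) []) ∈ vsL ++ vsR := by
          apply List.mem_append_right
          rw [hvsR]
          exact List.mem_map.mpr ⟨0, List.mem_range.mpr (by omega), rfl⟩
        calc pvMinLen (vsL ++ vsR) gk.length
            ≤ (calculateGravity gk (planets.getD (0 + 1 + 0) [])).length :=
              pvMinLen_le_mem _ _ hmem
          _ ≤ gk.length := by rw [calcG_length]; omega
          _ = m := hm0
    · have hmem : (calculateGravity (planets.getD 0 []) gk).map (fun x => -x) ∈ vsL ++ vsR := by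
        apply List.mem_append_left
        rw [hvsL]
        exact List.mem_map.mpr ⟨0, List.mem_range.mpr (by omega), rfl⟩
      calc pvMinLen (vsL ++ vsR) gk.length
          ≤ ((calculateGravity (planets.getD 0 []) gk).map (fun x => -x)).length :=
            pvMinLen_le_mem _ _ hmem
        _ ≤ m := by rw [List.length_map, calcG_length, hm0]; omega
  have hmin : pvMinLen (vsL ++ vsR) gk.length = m := le_antisymm hminle hminge
  have hbaselen : (gk.map (fun _ => (0 : Int))).length = gk.length := List.length_map ..
  apply List.ext_getElem
  · rw [pvChain_length, hbaselen, hmin, List.length_map, List.length_range]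
  intro d hd1 hd2
  have hdm : d < m := by
    rw [pvChain_length, hbaselen, hmin] at hd1
    exact hd1
  rw [← List.getD_eq_getElem _ (0 : Int) hd1,
    pvChain_getD _ _ d (by rw [hbaselen, hmin]; exact hdm),
    pvGetD_map gk _ d 0 0 (by omega), List.map_append, List.map_map, List.map_map]
  simp only [Function.comp_def]
  -- rewrite each summand into a sign comparison against planet k
  have hLrw : (List.range k).map (fun i =>
      ((calculateGravity (planets.getD i []) gk).map (fun x => -x)).getD d 0)
      = (List.range k).map (fun i => pvCalc (gk.getD d 0, (planets.getD i []).getD d 0)) := by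
    apply List.map_congr_left
    intro i hi
    have hik : i < k := List.mem_range.mp hi
    have hil : d < (planets.getD i []).length := by
      have := hpl i (by omega); omega
    rw [negmap_getD _ _ (by rw [calcG_length]; omega),
      calcG_getD _ _ _ hil (by omega), pvCalc_antisym]
    ring
  have hRrw : (List.range (n - (k + 1))).map (fun b =>
      (calculateGravity gk (planets.getD (k + 1 + b) [])).getD d 0)
      = (List.range (n - (k + 1))).map (fun b =>
          pvCalc (gk.getD d 0, (planets.getD (k + 1 + b) []).getD d 0)) := by
    apply List.map_congr_left
    intro b hb
    have hbn : b < n - (k + 1) := List.mem_range.mp hb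
    have hbl : d < (planets.getD (k + 1 + b) []).length := by
      have := hpl (k + 1 + b) (by omega); omega
    rw [calcG_getD _ _ _ (by omega) hbl]
  rw [hLrw, hRrw, zero_add, List.sum_append,
    pvSumSplit n k hkn (fun j => pvCalc (gk.getD d 0, (planets.getD j []).getD d 0))
      (by simp only [← hgk]; exact pvCalc_refl _),
    pvMapRange planets (fun q => pvCalc (gk.getD d 0, q.getD d 0)) []]
  have hmm : (planets.map (fun q => q.getD d 0)).map (fun c => pvCalc (gk.getD d 0, c))
      = planets.map (fun q => pvCalc (gk.getD d 0, q.getD d 0)) := by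
    rw [List.map_map]
    rfl
  rw [← hmm, pvSumCalc]
  -- right-hand side entry
  rw [List.getElem_map, List.getElem_range]
  rw [pvVal, pvCountLe]
  have hlen : ((planets.map fun q => q.getD d 0)).length = (n : Int) := by
    simp [hn]
  rw [hlen]

-- ===== VERDICT (by name: the statement is the Claim_ definition above) =====
theorem calculatePlanetGravities_spec : Claim_equal_calculatePlanetGravities := by
  intro planets _hdom hpre
  show calculatePlanetGravities planets = calculatePlanetGravities_alt planets
  by_cases hne : planets = []
  · subst hne
    rfl
  · rw [A_eq_count planets hpre, B_eq_count planets hne]
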